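-- pv_equiv track=rewrite | github.com/wdd1016/ProgramingPractice | Baekjoon/Silver/Dynamic_Programming/9095_plus.py | numofcase
-- ===== SOURCE A (Python) =====
-- def numofcase(lst, num):
-- 	if (num <= 2):
-- 		return num
-- 	elif (num == 3):
-- 		return 4
-- 	else:
-- 		if (lst[num] != 0):
-- 			return lst[num]
-- 		lst[num] = numofcase(lst, num - 3) + \
-- 			numofcase(lst, num - 2) + numofcase(lst, num - 1)
-- 		return lst[num]
-- ===== SOURCE B (Python) =====
-- def numofcase(lst, num):
--     if num <= 2:
--         return num
--     if num == 3:
--         return 4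
--     def v(k):
--         return k if k <= 2 else 4 if k == 3 else lst[k]
--     for i in range(4, num + 1):
--         if lst[i] == 0:
--             lst[i] = v(i - 3) + v(i - 2) + v(i - 1)
--     return lst[num]
-- ===== Notes on version B (the rewrite author's own statement) =====
-- stated objective: simpler
-- what changed: Replaces A's memoized recursive descent (top-down recursion threading the cache through three recursive calls) with a single bottom-up for-loop that fills the cache from index 4 up to num and then reads lst[num].
import Mathlib
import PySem

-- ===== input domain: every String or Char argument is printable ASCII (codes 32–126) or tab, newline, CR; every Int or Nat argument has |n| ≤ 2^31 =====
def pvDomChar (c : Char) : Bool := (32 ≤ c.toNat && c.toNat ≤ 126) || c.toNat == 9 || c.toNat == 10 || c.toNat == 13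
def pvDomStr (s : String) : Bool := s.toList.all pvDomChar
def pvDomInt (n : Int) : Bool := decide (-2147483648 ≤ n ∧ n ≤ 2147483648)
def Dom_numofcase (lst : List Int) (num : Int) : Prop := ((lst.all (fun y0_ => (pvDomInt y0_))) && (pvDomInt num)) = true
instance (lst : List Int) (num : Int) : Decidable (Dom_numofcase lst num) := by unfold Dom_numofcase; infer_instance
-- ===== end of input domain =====

-- B replaces A's memoized recursive descent with a bottom-up loop over indices 4..num (objective: simpler).
-- A mutates lst in place; the equivalence proved here is about the RETURN value only
-- (B fills the same cache entries bottom-up, but when lst[num] is pre-seeded A writes nothing while B still fills 4..num-1).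

-- ===== PORT A =====
-- A's recursion threads the mutated memo list through the calls; `none` = IndexError (excluded by Pre_).
def numofcaseGo (lst : List Int) (num : Int) : Option (List Int × Int) :=
  if num ≤ 2 then some (lst, num)
  else if num = 3 then some (lst, 4)
  else
    match PySem.List.pyGet? lst num with
    | none => none
    | some v =>
      if v ≠ 0 then some (lst, v)
      else
        match numofcaseGo lst (num - 3) with
        | none => none
        | some (l1, a) =>
          match numofcaseGo l1 (num - 2) with
          | none => none
          | some (l2, b) =>
            match numofcaseGo l2 (num - 1) with
            | none => none
            | some (l3, c) =>
              match PySem.List.pySet? l3 num (a + b + c) with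
              | none => none
              | some l4 => some (l4, a + b + c)
termination_by num.toNat
decreasing_by all_goals omega

def numofcase (lst : List Int) (num : Int) : Int :=
  match numofcaseGo lst num with
  | some (_, r) => r
  | none => 0   -- IndexError; excluded by Pre_numofcase

-- ===== PORT B =====
-- v(k) of Source B: base literals for k ≤ 3, else lst[k] (in range under Pre_).
def altV (l : List Int) (k : Int) : Int :=
  if k ≤ 2 then k else if k = 3 then 4 else PySem.List.pyGetD l k 0

-- one iteration of Source B's for-loop body
def altStep (l : List Int) (i : Int) : List Int :=
  if PySem.List.pyGetD l i 0 = 0 then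
    PySem.List.pySetD l i (altV l (i - 3) + altV l (i - 2) + altV l (i - 1))
  else l

def numofcase_alt (lst : List Int) (num : Int) : Int :=
  if num ≤ 2 then num
  else if num = 3 then 4
  else
    PySem.List.pyGetD ((PySem.List.pyRange 4 (num + 1) 1).foldl altStep lst) num 0

-- ===== PRECONDITION & SPEC =====
-- Pre_ excludes exactly the inputs where A raises IndexError: num ≥ 4 with num out of range of lst.
def Pre_numofcase (lst : List Int) (num : Int) : Prop := num ≤ 3 ∨ num < lst.length
instance (lst : List Int) (num : Int) : Decidable (Pre_numofcase lst num) := by unfold Pre_numofcase; infer_instance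
def pvWitness_numofcase : List Int × Int := ([0, 0, 0, 0, 0, 0, 0], 6)

def Spec_numofcase (lst : List Int) (num : Int) (out : Int) : Prop := out = numofcase_alt lst num
instance (lst : List Int) (num : Int) (out : Int) : Decidable (Spec_numofcase lst num out) := by unfold Spec_numofcase; infer_instance

-- ===== CLAIM (what is proved, stated in full; the proofs are below) =====
def Claim_equal_numofcase : Prop := ∀ (lst : List Int) (num : Int), Dom_numofcase lst num → Pre_numofcase lst num → Spec_numofcase lst num (numofcase lst num)

-- ===== LEMMAS AND PROOFS =====

-- the pure value both programs compute: the memo recurrence read off the ORIGINAL list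
def fp (lst : List Int) : Nat → Int
  | 0 => 0
  | 1 => 1
  | 2 => 2
  | 3 => 4
  | n + 4 =>
    if lst.getD (n + 4) 0 ≠ 0 then lst.getD (n + 4) 0
    else fp lst (n + 1) + fp lst (n + 2) + fp lst (n + 3)

lemma fp_ge4 (lst : List Int) (n : Nat) (h : 4 ≤ n) :
    fp lst n = if lst.getD n 0 ≠ 0 then lst.getD n 0
               else fp lst (n - 3) + fp lst (n - 2) + fp lst (n - 1) := by
  obtain ⟨m, rfl⟩ : ∃ m, n = m + 4 := ⟨n - 4, by omega⟩
  rw [(by omega : m + 4 - 3 = m + 1), (by omega : m + 4 - 2 = m + 2),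
      (by omega : m + 4 - 1 = m + 3)]
  rfl

lemma fp_le2 (lst : List Int) (n : Nat) (h : n ≤ 2) : fp lst n = n := by
  interval_cases n <;> rfl

-- invariant on A's threaded memo list
def InvA (lst l : List Int) : Prop :=
  l.length = lst.length ∧
  ∀ k : Nat, l.getD k 0 = lst.getD k 0 ∨ (lst.getD k 0 = 0 ∧ l.getD k 0 = fp lst k)

lemma goA_eq (lst : List Int) : ∀ (n : Nat) (l : List Int), InvA lst l →
    (n ≤ 3 ∨ n < lst.length) →
    ∃ l', numofcaseGo l (n : Int) = some (l', fp lst n) ∧ InvA lst l' := by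
  intro n
  induction n using Nat.strong_induction_on with
  | _ n ih =>
    intro l hInv hn
    by_cases h2 : n ≤ 2
    · refine ⟨l, ?_, hInv⟩
      rw [numofcaseGo]
      simp [fp_le2 lst n h2, show (n : Int) ≤ 2 by exact_mod_cast Int.ofNat_le.mpr h2]
    · by_cases h3 : n = 3
      · subst h3
        refine ⟨l, ?_, hInv⟩
        rw [numofcaseGo]; norm_num [fp]
      · have h4 : 4 ≤ n := by omega
        have hlen : n < lst.length := by omega
        have hlenl : n < l.length := by rw [hInv.1]; exact hlen
        have hget : PySem.List.pyGet? l (n : Int) = some (l.getD n 0) := by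
          rw [PySem.List.pyGet?_natCast, List.getElem?_eq_getElem hlenl,
              List.getD_eq_getElem l 0 hlenl]
        rw [numofcaseGo]
        rw [if_neg (by exact_mod_cast fun h => h2 (by exact_mod_cast h)),
            if_neg (by exact_mod_cast fun h => h3 (by exact_mod_cast h)), hget]
        dsimp only
        by_cases hv : l.getD n 0 ≠ 0
        · refine ⟨l, ?_, hInv⟩
          rw [if_pos hv]
          rcases hInv.2 n with hcase | ⟨hz, hfp⟩
          · rw [fp_ge4 lst n h4, if_pos (by rw [← hcase]; exact hv), ← hcase]
          · rw [hfp]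
        · rw [not_not] at hv
          rw [if_neg (fun h => h hv)]
          have hz : lst.getD n 0 = 0 := by
            rcases hInv.2 n with hcase | ⟨hz, _⟩
            · rw [← hcase, hv]
            · exact hz
          have c3 : ((n : Int) - 3) = ((n - 3 : Nat) : Int) := by omega
          have c2 : ((n : Int) - 2) = ((n - 2 : Nat) : Int) := by omega
          have c1 : ((n : Int) - 1) = ((n - 1 : Nat) : Int) := by omega
          obtain ⟨l1, e1, i1⟩ := ih (n - 3) (by omega) l hInv (by omega)
          obtain ⟨l2, e2, i2⟩ := ih (n - 2) (by omega) l1 i1 (by omega)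
          obtain ⟨l3, e3, i3⟩ := ih (n - 1) (by omega) l2 i2 (by omega)
          rw [c3, e1]; dsimp only
          rw [c2, e2]; dsimp only
          rw [c1, e3]; dsimp only
          have hlen3 : n < l3.length := by rw [i3.1]; exact hlen
          have hset : PySem.List.pySet? l3 (n : Int)
              (fp lst (n - 3) + fp lst (n - 2) + fp lst (n - 1)) =
              some (l3.set n (fp lst (n - 3) + fp lst (n - 2) + fp lst (n - 1))) :=
            PySem.List.pySet?_natCast l3 n _ hlen3
          rw [hset]; dsimp only
          have hfpn : fp lst n = fp lst (n - 3) + fp lst (n - 2) + fp lst (n - 1) := by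
            rw [fp_ge4 lst n h4, if_neg (fun h => h hz)]
          refine ⟨_, by rw [hfpn], ?_, ?_⟩
          · rw [List.length_set]; exact i3.1
          · intro k
            by_cases hk : k = n
            · subst hk
              right
              refine ⟨hz, ?_⟩
              rw [hfpn]
              simp [List.getD, hlen3]
            · have : (l3.set n (fp lst (n - 3) + fp lst (n - 2) + fp lst (n - 1))).getD k 0
                  = l3.getD k 0 := by
                simp [List.getD, List.getElem?_set_ne (fun h => hk h.symm)]
              rw [this]
              exact i3.2 k

-- invariant on B's loop: entries 4 ≤ k < j that started as 0 now hold fp lst k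
def InvB (lst l : List Int) (j : Nat) : Prop :=
  l.length = lst.length ∧
  ∀ k : Nat, l.getD k 0 =
    (if 4 ≤ k ∧ k < j ∧ lst.getD k 0 = 0 then fp lst k else lst.getD k 0)

lemma altV_eq (lst l : List Int) (j : Nat) (hInv : InvB lst l j) (k : Nat)
    (hk1 : 1 ≤ k) (hkj : k < j) : altV l (k : Int) = fp lst k := by
  unfold altV
  by_cases h2 : k ≤ 2
  · rw [if_pos (by exact_mod_cast Int.ofNat_le.mpr h2), fp_le2 lst k h2]
  · by_cases h3 : k = 3
    · subst h3; norm_num [fp]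
    · have h4 : 4 ≤ k := by omega
      rw [if_neg (by exact_mod_cast fun h => h2 (by exact_mod_cast h)),
          if_neg (by exact_mod_cast fun h => h3 (by exact_mod_cast h)),
          PySem.List.pyGetD_natCast, hInv.2 k]
      by_cases hz : lst.getD k 0 = 0
      · rw [if_pos ⟨h4, hkj, hz⟩]
      · rw [if_neg (fun h => hz h.2.2), fp_ge4 lst k h4, if_pos hz]

lemma foldB (lst : List Int) : ∀ (c j : Nat) (l : List Int), 4 ≤ j →
    j + c ≤ lst.length → InvB lst l j →
    InvB lst ((PySem.List.pyRange (j : Int) ((j : Int) + c) 1).foldl altStep l) (j + c) := by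
  intro c
  induction c with
  | zero => intro j l _ _ h; simpa [PySem.List.pyRange_one_eq_nil] using h
  | succ c ih =>
    intro j l hj hle hInv
    rw [PySem.List.pyRange_one_cons (by omega : (j : Int) < (j : Int) + (c + 1 : Nat))]
    rw [List.foldl_cons]
    have hjlen : j < lst.length := by omega
    have hjl : j < l.length := by rw [hInv.1]; exact hjlen
    have hstep : InvB lst (altStep l (j : Int)) (j + 1) := by
      unfold altStep
      rw [PySem.List.pyGetD_natCast, hInv.2 j,
          if_neg (show ¬(4 ≤ j ∧ j < j ∧ lst.getD j 0 = 0) from fun h => lt_irrefl j h.2.1)]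
      by_cases hz : lst.getD j 0 = 0
      · rw [if_pos hz]
        have c3 : ((j : Int) - 3) = ((j - 3 : Nat) : Int) := by omega
        have c2 : ((j : Int) - 2) = ((j - 2 : Nat) : Int) := by omega
        have c1 : ((j : Int) - 1) = ((j - 1 : Nat) : Int) := by omega
        rw [c3, altV_eq lst l j hInv (j - 3) (by omega) (by omega),
            c2, altV_eq lst l j hInv (j - 2) (by omega) (by omega),
            c1, altV_eq lst l j hInv (j - 1) (by omega) (by omega)]
        have hfpj : fp lst j = fp lst (j - 3) + fp lst (j - 2) + fp lst (j - 1) := by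
          rw [fp_ge4 lst j hj, if_neg (fun h => h hz)]
        rw [PySem.List.pySetD_natCast]
        constructor
        · rw [List.length_set]; exact hInv.1
        · intro k
          by_cases hk : k = j
          · subst hk
            rw [if_pos ⟨hj, by omega, hz⟩, hfpj]
            simp [List.getD, hjl]
          · have hne : (l.set j (fp lst (j - 3) + fp lst (j - 2) + fp lst (j - 1))).getD k 0
                = l.getD k 0 := by
              simp [List.getD, List.getElem?_set_ne (fun h => hk h.symm)]
            rw [hne, hInv.2 k]
            by_cases hkj : k < j
            · rw [if_congr (by omega : (4 ≤ k ∧ k < j ∧ lst.getD k 0 = 0) ↔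
                    (4 ≤ k ∧ k < j + 1 ∧ lst.getD k 0 = 0)) rfl rfl]
            · rw [if_neg (fun h => (by omega : ¬ k < j) h.2.1),
                  if_neg (fun h => (by omega : ¬ k < j + 1) h.2.1)]
      · rw [if_neg hz]
        refine ⟨hInv.1, fun k => ?_⟩
        rw [hInv.2 k]
        by_cases hk : k = j
        · rw [if_neg (fun h => (by omega : ¬ k < j) h.2.1), if_neg (fun h => hz (hk ▸ h.2.2))]
        · by_cases hkj : k < j
          · rw [if_congr (by omega : (4 ≤ k ∧ k < j ∧ lst.getD k 0 = 0) ↔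
                  (4 ≤ k ∧ k < j + 1 ∧ lst.getD k 0 = 0)) rfl rfl]
          · rw [if_neg (fun h => (by omega : ¬ k < j) h.2.1),
                if_neg (fun h => (by omega : ¬ k < j + 1) h.2.1)]
    have := ih (j + 1) (altStep l (j : Int)) (by omega) (by omega) hstep
    have harith : ((j : Int) + 1) = ((j + 1 : Nat) : Int) := by omega
    have harith2 : ((j + 1 : Nat) : Int) + (c : Nat) = (j : Int) + ((c + 1 : Nat) : Int) := by
      push_cast; ring
    rw [harith, ← harith2]
    rw [(by omega : j + (c + 1) = (j + 1) + c)]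
    exact this

-- ===== VERDICT (by name: the statement is the Claim_ definition above) =====
theorem numofcase_spec : Claim_equal_numofcase := by
  intro lst num _ hpre
  unfold Spec_numofcase numofcase numofcase_alt
  by_cases h2 : num ≤ 2
  · rw [numofcaseGo, if_pos h2, if_pos h2]
  · by_cases h3 : num = 3
    · subst h3; rw [numofcaseGo]; norm_num
    · have h4 : 4 ≤ num := by omega
      have hlen : num < (lst.length : Int) := by
        rcases hpre with h | h
        · omega
        · exact h
      set N := num.toNat with hN
      have hnum : num = (N : Int) := by omega
      have hNlen : N < lst.length := by omega
      have hInvA0 : InvA lst lst := ⟨rfl, fun k => Or.inl rfl⟩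
      obtain ⟨l', e, _⟩ := goA_eq lst N lst hInvA0 (Or.inr hNlen)
      -- B side
      have hInvB0 : InvB lst lst 4 := ⟨rfl, fun k => by
        rw [if_neg (fun h => (by omega : ¬ k < 4) h.2.1)]⟩
      have hfold := foldB lst (N - 3) 4 lst (by omega) (by omega) hInvB0
      have hrange : (PySem.List.pyRange 4 ((N : Int) + 1) 1)
          = PySem.List.pyRange ((4 : Nat) : Int) (((4 : Nat) : Int) + ((N - 3 : Nat) : Int)) 1 := by
        congr 1 <;> omega
      rw [if_neg h2, if_neg h3, hnum, e]
      dsimp only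
      rw [hrange, PySem.List.pyGetD_natCast, hfold.2 N,
          (by omega : 4 + (N - 3) = N + 1)]
      by_cases hz : lst.getD N 0 = 0
      · rw [if_pos ⟨by omega, by omega, hz⟩]
      · rw [if_neg (fun h => hz h.2.2), fp_ge4 lst N (by omega), if_pos hz]
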